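-- pv_equiv track=rewrite | github.com/gk-gokul/jaseci_labs_take_home | agent_6.py | _has_drafted_message_this_turn
-- ===== SOURCE A (Python) =====
-- def _has_drafted_message_this_turn(state):
--     tools = state.get("tools_used", [])
--     last_parse_index = -1
--     for i, t in enumerate(tools):
--         if t["tool"] == "parse_customer_reply":
--             last_parse_index = i
--     for i, t in enumerate(tools):
--         if t["tool"] == "draft_customer_message" and i > last_parse_index:
--             return True
--     return False
-- ===== SOURCE B (Python) =====
-- def _has_drafted_message_this_turn(state):
--     for t in reversed(state.get("tools_used", [])):
--         tool = t["tool"]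
--         if tool == "draft_customer_message":
--             return True
--         if tool == "parse_customer_reply":
--             return False
--     return False
-- ===== Notes on version B (the rewrite author's own statement) =====
-- stated objective: simpler
-- what changed: Replaced A's two forward passes (one computing the last parse index, one scanning for a later draft) with a single backward scan over reversed(tools) that returns True on the first draft, False on the first parse, and maintains no index.
import Mathlib
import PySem

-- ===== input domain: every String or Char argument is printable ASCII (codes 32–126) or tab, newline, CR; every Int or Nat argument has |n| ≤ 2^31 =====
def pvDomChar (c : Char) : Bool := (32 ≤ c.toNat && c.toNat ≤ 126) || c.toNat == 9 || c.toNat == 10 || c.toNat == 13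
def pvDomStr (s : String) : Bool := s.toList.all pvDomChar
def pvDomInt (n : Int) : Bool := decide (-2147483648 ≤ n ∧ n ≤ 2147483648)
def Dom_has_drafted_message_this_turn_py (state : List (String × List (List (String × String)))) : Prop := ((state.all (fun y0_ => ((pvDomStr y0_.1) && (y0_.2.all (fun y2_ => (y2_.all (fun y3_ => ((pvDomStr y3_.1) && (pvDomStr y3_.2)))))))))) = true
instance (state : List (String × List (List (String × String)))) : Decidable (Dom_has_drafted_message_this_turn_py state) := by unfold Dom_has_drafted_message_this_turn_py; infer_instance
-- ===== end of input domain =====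

-- B replaces A's two forward passes (last-parse index, then scan for a later draft) by a
-- single backward scan with no index: simpler decomposition, same O(n) cost.

-- t["tool"] (Pre_ guarantees the key is present, so the getD default is never the value used)
def pvTool (t : List (String × String)) : String := (PySem.Dict.get? (PySem.Dict.mk t) "tool").getD ""

-- ===== PORT A =====
-- first loop of A: for i, t in enumerate(tools): if t["tool"] == "parse_customer_reply": last_parse_index = i
def pvAFind : List (List (String × String)) → Nat → Int → Int
  | [], _, acc => acc
  | t :: rest, i, acc =>
      pvAFind rest (i + 1) (if pvTool t = "parse_customer_reply" then (i : Int) else acc)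

-- second loop of A: for i, t in enumerate(tools): if draft and i > last_parse_index: return True
def pvAScan : List (List (String × String)) → Nat → Int → Bool
  | [], _, _ => false
  | t :: rest, i, lp =>
      if pvTool t = "draft_customer_message" ∧ (i : Int) > lp then true
      else pvAScan rest (i + 1) lp

def has_drafted_message_this_turn_py (state : List (String × List (List (String × String)))) : Bool :=
  let tools := (PySem.Dict.get? (PySem.Dict.mk state) "tools_used").getD []
  pvAScan tools 0 (pvAFind tools 0 (-1))

-- ===== PORT B =====
-- B's single backward scan: for t in reversed(tools): draft → True, parse → False; else False
def pvBScan : List (List (String × String)) → Bool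
  | [] => false
  | t :: rest =>
      let tool := pvTool t
      if tool = "draft_customer_message" then true
      else if tool = "parse_customer_reply" then false
      else pvBScan rest

def has_drafted_message_this_turn_py_alt (state : List (String × List (List (String × String)))) : Bool :=
  pvBScan ((PySem.Dict.get? (PySem.Dict.mk state) "tools_used").getD []).reverse

-- ===== PRECONDITION & SPEC =====
-- Pre_ excludes inputs where some entry of tools_used lacks the key "tool": Python A raises KeyError there.
def Pre_has_drafted_message_this_turn_py (state : List (String × List (List (String × String)))) : Prop :=
  ∀ t ∈ (PySem.Dict.get? (PySem.Dict.mk state) "tools_used").getD [], (PySem.Dict.get? (PySem.Dict.mk t) "tool").isSome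
instance (state : List (String × List (List (String × String)))) : Decidable (Pre_has_drafted_message_this_turn_py state) := by unfold Pre_has_drafted_message_this_turn_py; infer_instance

def pvWitness_has_drafted_message_this_turn_py : (List (String × List (List (String × String)))) :=
  [("tools_used", [[("tool", "parse_customer_reply")], [("tool", "draft_customer_message")]])]

def Spec_has_drafted_message_this_turn_py (state : List (String × List (List (String × String)))) (out : Bool) : Prop := out = has_drafted_message_this_turn_py_alt state
instance (state : List (String × List (List (String × String)))) (out : Bool) : Decidable (Spec_has_drafted_message_this_turn_py state out) := by unfold Spec_has_drafted_message_this_turn_py; infer_instance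

-- ===== CLAIM (what is proved, stated in full; the proofs are below) =====
def Claim_equal_has_drafted_message_this_turn_py : Prop := ∀ (state : List (String × List (List (String × String)))), Dom_has_drafted_message_this_turn_py state → Pre_has_drafted_message_this_turn_py state → Spec_has_drafted_message_this_turn_py state (has_drafted_message_this_turn_py state)
-- ===== LEMMAS AND PROOFS =====

theorem pvAFind_append (xs : List (List (String × String))) (x : List (String × String))
    (i : Nat) (acc : Int) :
    pvAFind (xs ++ [x]) i acc
      = if pvTool x = "parse_customer_reply" then ((i + xs.length : Nat) : Int)
        else pvAFind xs i acc := by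
  induction xs generalizing i acc with
  | nil => simp [pvAFind]
  | cons y ys ih =>
      simp only [List.cons_append, pvAFind, ih, List.length_cons]
      split_ifs <;> (norm_num; try ring)

theorem pvAScan_append (xs : List (List (String × String))) (x : List (String × String))
    (i : Nat) (lp : Int) :
    pvAScan (xs ++ [x]) i lp
      = (pvAScan xs i lp
         || decide (pvTool x = "draft_customer_message" ∧ ((i + xs.length : Nat) : Int) > lp)) := by
  induction xs generalizing i with
  | nil => simp [pvAScan]
  | cons y ys ih =>
      simp only [List.cons_append, pvAScan, List.length_cons]
      split_ifs with h
      · simp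
      · rw [ih]
        norm_num
        ring_nf

theorem pvAFind_lt (xs : List (List (String × String))) (i : Nat) (acc : Int)
    (h : acc < i + xs.length) : pvAFind xs i acc < i + xs.length := by
  induction xs generalizing i acc with
  | nil => simpa using h
  | cons y ys ih =>
      simp only [pvAFind, List.length_cons]
      split_ifs with hy
      · have : (i : Int) < (i + 1) + ys.length := by omega
        simpa [add_comm, add_left_comm, add_assoc] using ih (i + 1) i this
      · have : acc < (i + 1 : Nat) + ys.length := by
          simp only [List.length_cons] at h; push_cast at h ⊢; omega
        have := ih (i + 1) acc this
        push_cast at this; omega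

theorem pvAScan_none (xs : List (List (String × String))) (i : Nat) (lp : Int)
    (h : (i : Int) + xs.length ≤ lp + 1) : pvAScan xs i lp = false := by
  induction xs generalizing i with
  | nil => rfl
  | cons y ys ih =>
      simp only [pvAScan]
      have hnot : ¬ ((i : Int) > lp) := by
        simp only [List.length_cons] at h; push_cast at h; omega
      rw [if_neg (by tauto)]
      exact ih (i + 1) (by simp only [List.length_cons] at h; push_cast at h ⊢; omega)

theorem pvAB_eq (ts : List (List (String × String))) :
    pvAScan ts 0 (pvAFind ts 0 (-1)) = pvBScan ts.reverse := by
  induction ts using List.reverseRecOn with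
  | nil => rfl
  | append_singleton xs x ih =>
      rw [List.reverse_append]
      simp only [List.reverse_singleton, List.singleton_append, pvBScan]
      rw [pvAScan_append, pvAFind_append]
      by_cases hd : pvTool x = "draft_customer_message"
      · have hlt : pvAFind xs 0 (-1) < (0 : Nat) + xs.length := pvAFind_lt xs 0 (-1) (by push_cast; omega)
        have hlt' : pvAFind xs 0 (-1) < (xs.length : Int) := by simpa using hlt
        by_cases hp : pvTool x = "parse_customer_reply"
        · simp [hd] at *
        · simp [hd, hlt']
      · by_cases hp : pvTool x = "parse_customer_reply"
        · rw [if_pos hp]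
          have := pvAScan_none xs 0 (xs.length : Int) (by push_cast; omega)
          simp [hp, this]
        · simp [hd, hp, ih]

-- ===== VERDICT (by name: the statement is the Claim_ definition above) =====
theorem has_drafted_message_this_turn_py_spec : Claim_equal_has_drafted_message_this_turn_py := by
  intro state _ _
  unfold Spec_has_drafted_message_this_turn_py has_drafted_message_this_turn_py
    has_drafted_message_this_turn_py_alt
  exact pvAB_eq _
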